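-- pv_equiv track=rewrite | github.com/ishirgarg/adversarial_memory | playground/memdaily/analyze_errors.py | collapse_error_type
-- ===== SOURCE A (Python) =====
-- from typing import Dict, List, Optional, Tuple
--
-- ERROR_TYPE_PRIORITY = ["not_stored", "summary_error", "not_retrieved"]
--
-- def collapse_error_type(per_fact_results: list, correctly_invoked: Optional[bool]) -> str:
--     categories = {f.get("category") for f in per_fact_results}
--     for category in ERROR_TYPE_PRIORITY:
--         if category in categories:
--             return category
--     if correctly_invoked is False:
--         return "reasoning_error"
--     return "correct"
-- ===== SOURCE B (Python) =====
-- from typing import Dict, List, Optional, Tuple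
--
-- ERROR_TYPE_PRIORITY = ["not_stored", "summary_error", "not_retrieved"]
--
-- def collapse_error_type(per_fact_results: list, correctly_invoked: Optional[bool]) -> str:
--     rank = {c: i for i, c in enumerate(ERROR_TYPE_PRIORITY)}
--     best = None
--     for f in per_fact_results:
--         r = rank.get(f.get("category"))
--         if r is not None and (best is None or r < best):
--             best = r
--     if best is not None:
--         return ERROR_TYPE_PRIORITY[best]
--     return "reasoning_error" if correctly_invoked is False else "correct"
-- ===== Notes on version B (the rewrite author's own statement) =====
-- stated objective: alternative
-- what changed: Instead of building a set of all categories and scanning the priority list against it, B builds a rank index once and makes a single pass over the facts keeping the minimum rank seen, indexing the priority list at the end.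
import Mathlib
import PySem

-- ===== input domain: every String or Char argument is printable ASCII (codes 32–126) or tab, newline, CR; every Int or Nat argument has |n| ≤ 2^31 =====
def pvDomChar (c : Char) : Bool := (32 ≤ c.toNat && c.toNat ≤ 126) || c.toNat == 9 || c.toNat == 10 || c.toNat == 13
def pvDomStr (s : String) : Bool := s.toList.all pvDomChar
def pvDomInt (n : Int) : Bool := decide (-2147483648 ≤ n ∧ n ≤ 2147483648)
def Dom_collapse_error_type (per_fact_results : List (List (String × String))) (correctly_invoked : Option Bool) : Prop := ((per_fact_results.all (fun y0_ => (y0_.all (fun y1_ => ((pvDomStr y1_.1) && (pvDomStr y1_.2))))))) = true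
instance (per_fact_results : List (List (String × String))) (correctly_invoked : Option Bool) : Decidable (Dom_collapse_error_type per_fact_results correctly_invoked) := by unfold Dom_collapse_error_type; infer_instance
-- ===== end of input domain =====

-- B replaces A's category-set + priority-list scan by a rank index and one pass over the
-- facts keeping the minimum rank (alternative decomposition, same asymptotic cost).

def ERROR_TYPE_PRIORITY : List String := ["not_stored", "summary_error", "not_retrieved"]

-- ===== PORT A =====
def collapse_error_type (per_fact_results : List (List (String × String))) (correctly_invoked : Option Bool) : String :=
  let categories : PySem.Set (Option String) :=
    PySem.Set.ofList (per_fact_results.map (fun f => (PySem.Dict.mk f).get? "category"))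
  match ERROR_TYPE_PRIORITY.find? (fun category => PySem.Set.contains categories (some category)) with
  | some category => category
  | none => if correctly_invoked = some false then "reasoning_error" else "correct"

-- ===== PORT B =====
-- rank = {c: i for i, c in enumerate(ERROR_TYPE_PRIORITY)}
def pvRank : PySem.Dict String Int :=
  (PySem.List.enumerate ERROR_TYPE_PRIORITY).foldl (fun d p => d.insert p.2 p.1) PySem.Dict.empty

def collapse_error_type_alt (per_fact_results : List (List (String × String))) (correctly_invoked : Option Bool) : String :=
  let best : Option Int := per_fact_results.foldl (fun best f =>
      match (match (PySem.Dict.mk f).get? "category" with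
             | some s => pvRank.get? s
             | none => none), best with
      | some r, none => some r
      | some r, some b => if r < b then some r else some b
      | none, b => b) none
  match best with
  | some b => PySem.List.pyGetD ERROR_TYPE_PRIORITY b ""
  | none => if correctly_invoked = some false then "reasoning_error" else "correct"

-- ===== PRECONDITION & SPEC =====
def Spec_collapse_error_type (per_fact_results : List (List (String × String))) (correctly_invoked : Option Bool) (out : String) : Prop := out = collapse_error_type_alt per_fact_results correctly_invoked
instance (per_fact_results : List (List (String × String))) (correctly_invoked : Option Bool) (out : String) : Decidable (Spec_collapse_error_type per_fact_results correctly_invoked out) := by unfold Spec_collapse_error_type; infer_instance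

-- ===== CLAIM (what is proved, stated in full; the proofs are below) =====
def Claim_equal_collapse_error_type : Prop := ∀ (per_fact_results : List (List (String × String))) (correctly_invoked : Option Bool), Dom_collapse_error_type per_fact_results correctly_invoked → Spec_collapse_error_type per_fact_results correctly_invoked (collapse_error_type per_fact_results correctly_invoked)

-- ===== LEMMAS AND PROOFS =====

def pvCat (f : List (String × String)) : Option String := (PySem.Dict.mk f).get? "category"

def pvOmin : Option Int → Option Int → Option Int
  | none, y => y
  | some a, none => some a
  | some a, some b => some (min a b)

def pvEnc (b0 b1 b2 : Bool) : Option Int :=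
  if b0 then some 0 else if b1 then some 1 else if b2 then some 2 else none

lemma pvOmin_none (a : Option Int) : pvOmin a none = a := by cases a <;> rfl

lemma pvOmin_assoc (a b c : Option Int) : pvOmin (pvOmin a b) c = pvOmin a (pvOmin b c) := by
  cases a <;> cases b <;> cases c <;> simp [pvOmin, min_assoc]

lemma pvRank_none (s : String) (h0 : s ≠ "not_stored") (h1 : s ≠ "summary_error")
    (h2 : s ≠ "not_retrieved") : pvRank.get? s = none := by
  show (PySem.Dict.mk [("not_stored", (0:Int)), ("summary_error", 1), ("not_retrieved", 2)]).get? s = none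
  rw [PySem.Dict.get?_mk_cons, if_neg (by simpa using Ne.symm h0),
     PySem.Dict.get?_mk_cons, if_neg (by simpa using Ne.symm h1),
     PySem.Dict.get?_mk_cons, if_neg (by simpa using Ne.symm h2)]
  rfl

lemma pvStep_eq (acc : Option Int) (f : List (String × String)) :
    (match (match (PySem.Dict.mk f).get? "category" with
            | some s => pvRank.get? s
            | none => none), acc with
     | some r, none => some r
     | some r, some b => if r < b then some r else some b
     | none, b => b)
    = pvOmin acc ((pvCat f).bind (fun s => pvRank.get? s)) := by
  unfold pvCat
  rcases (PySem.Dict.mk f).get? "category" with _ | s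
  · cases acc <;> rfl
  · show (match pvRank.get? s, acc with
      | some r, none => some r
      | some r, some b => if r < b then some r else some b
      | none, b => b) = pvOmin acc (pvRank.get? s)
    rcases pvRank.get? s with _ | r <;> cases acc <;> simp [pvOmin, Int.min_def] <;>
      split_ifs <;> simp <;> omega

lemma pvRk_enc (f : List (String × String)) (b0 b1 b2 : Bool) :
    pvOmin ((pvCat f).bind (fun s => pvRank.get? s)) (pvEnc b0 b1 b2)
    = pvEnc ((pvCat f == some "not_stored") || b0) ((pvCat f == some "summary_error") || b1)
            ((pvCat f == some "not_retrieved") || b2) := by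
  rcases hc : pvCat f with _ | s
  · cases b0 <;> cases b1 <;> cases b2 <;> rfl
  · by_cases e0 : s = "not_stored"
    · subst e0; cases b0 <;> cases b1 <;> cases b2 <;> decide
    · by_cases e1 : s = "summary_error"
      · subst e1; cases b0 <;> cases b1 <;> cases b2 <;> decide
      · by_cases e2 : s = "not_retrieved"
        · subst e2; cases b0 <;> cases b1 <;> cases b2 <;> decide
        · simp only [Option.bind_some, pvRank_none s e0 e1 e2, pvOmin]
          cases b0 <;> cases b1 <;> cases b2 <;> simp [pvEnc, e0, e1, e2]

lemma pvFoldB (cs : List (List (String × String))) (acc : Option Int) :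
    cs.foldl (fun best f =>
      match (match (PySem.Dict.mk f).get? "category" with
             | some s => pvRank.get? s
             | none => none), best with
      | some r, none => some r
      | some r, some b => if r < b then some r else some b
      | none, b => b) acc
    = pvOmin acc (pvEnc (cs.any (fun f => pvCat f == some "not_stored"))
                        (cs.any (fun f => pvCat f == some "summary_error"))
                        (cs.any (fun f => pvCat f == some "not_retrieved"))) := by
  induction cs generalizing acc with
  | nil => simp [pvEnc, pvOmin_none]
  | cons f cs ih =>
    simp only [List.foldl_cons, List.any_cons]
    rw [ih, pvStep_eq, pvOmin_assoc, pvRk_enc]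

lemma pvMemA (xs : List (Option String)) (y : Option String) :
    PySem.Set.contains (PySem.Set.ofList xs) y = decide (y ∈ xs) := by
  simp [pysem, PySem.Set.contains]

lemma pvAnyMem (l : List (List (String × String))) (y : Option String) :
    (l.any fun f => pvCat f == y) = decide (y ∈ l.map pvCat) := by
  induction l with
  | nil => simp
  | cons h t ih =>
    have hb : (pvCat h == y) = decide (y = pvCat h) := by
      by_cases hgy : pvCat h = y
      · simp [hgy]
      · simp [hgy, Ne.symm hgy]
    simp [ih, hb]

-- ===== VERDICT (by name: the statement is the Claim_ definition above) =====
theorem collapse_error_type_spec : Claim_equal_collapse_error_type := by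
  intro l ci _
  show collapse_error_type l ci = collapse_error_type_alt l ci
  unfold collapse_error_type collapse_error_type_alt
  rw [pvFoldB]
  have hmap : l.map (fun f => (PySem.Dict.mk f).get? "category") = l.map pvCat := rfl
  simp only [hmap, pvMemA, pvAnyMem, ERROR_TYPE_PRIORITY, List.find?]
  by_cases m0 : some "not_stored" ∈ l.map pvCat <;>
    by_cases m1 : some "summary_error" ∈ l.map pvCat <;>
      by_cases m2 : some "not_retrieved" ∈ l.map pvCat <;>
        simp [m0, m1, m2, pvEnc, pvOmin] <;> rfl
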